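-- pv_equiv track=rewrite | github.com/omaraisa/assist | Progent/test_function_generation.py | generate_progent_function
-- ===== SOURCE A (Python) =====
-- def generate_progent_function(tool_name, parameters, summary=""):
--     """Generate a progent.pyt style function"""
--     func_name = tool_name.lower().replace(' ', '_').replace('-', '_')
--
--     # Build parameter extraction and validation
--     param_lines = []
--     required_params = []
--
--     for i, param in enumerate(parameters):
--         name = param["name"]
--         datatype = param["datatype"]
--         explanation = param["explanation"]
--
--         param_name = name.lower().replace(' ', '_').replace('-', '_')
--
--         # First 2 parameters are typically required
--         if i < 2:
--             required_params.append(param_name)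
--             param_lines.append(f'    {param_name} = params.get("{param_name}")')
--             param_lines.append(f'    if {param_name} is None:')
--             param_lines.append(f'        return {{"success": False, "error": "{param_name} parameter is required"}}')
--         else:
--             param_lines.append(f'    {param_name} = params.get("{param_name}")')
--
--     # Generate output name logic
--     if required_params:
--         output_name = f"{required_params[0].replace(' ', '_')}_{tool_name}"
--     else:
--         output_name = f"{tool_name}_output"
--
--     # Build arcpy call arguments
--     arcpy_args = []
--     for param in parameters:
--         param_name = param["name"].lower().replace(' ', '_').replace('-', '_')
--         arcpy_args.append(f'r"{{{param_name}}}"')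
--
--     # Function template
--     function = f'''    def {func_name}(self, params):
--         """{tool_name}
--
-- {summary if summary else f'Execute {tool_name} geoprocessing tool.'}
--
--         params: {{{', '.join([f'"{p["name"].lower().replace(" ", "_").replace("-", "_")}": <{p["datatype"]}>' for p in parameters[:3]])}{', ...' if len(parameters) > 3 else ''}}}
--         Returns: {{"success": True, "output_layer": <output_name>, "output_path": <output_path>}} or error
--         """
--         try:
-- {chr(10).join(param_lines)}
--
--             # Generate output path
--             aprx = arcpy.mp.ArcGISProject("CURRENT")
--             output_path = os.path.join(aprx.defaultGeodatabase, "{output_name}")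
--             output_path = arcpy.CreateUniqueName(output_path)
--
--             # Execute {tool_name}
--             arcpy.{tool_name}({', '.join(arcpy_args)})
--
--             self._add_to_map(output_path)
--             return {{"success": True, "output_layer": "{output_name}", "output_path": output_path}}
--
--         except Exception as e:
--             return {{"success": False, "error": str(e)}}
-- '''
--
--     return function
-- ===== SOURCE B (Python) =====
-- TEMPLATE = '''    def {func_name}(self, params):
--         """{tool_name}
--
-- {desc}
--
--         params: {{{docs}}}
--         Returns: {{"success": True, "output_layer": <output_name>, "output_path": <output_path>}} or error
--         """
--         try:
-- {param_block}
--
--             # Generate output path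
--             aprx = arcpy.mp.ArcGISProject("CURRENT")
--             output_path = os.path.join(aprx.defaultGeodatabase, "{output_name}")
--             output_path = arcpy.CreateUniqueName(output_path)
--
--             # Execute {tool_name}
--             arcpy.{tool_name}({arcpy_args})
--
--             self._add_to_map(output_path)
--             return {{"success": True, "output_layer": "{output_name}", "output_path": output_path}}
--
--         except Exception as e:
--             return {{"success": False, "error": str(e)}}
-- '''
--
--
-- def generate_progent_function(tool_name, parameters, summary=""):
--     """Generate a progent.pyt style function: recursive descent over the
--     parameter list producing ready-joined string fields, plugged into one
--     named-placeholder template via str.format."""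
--
--     def norm(s):
--         return s.lower().replace(' ', '_').replace('-', '_')
--
--     def walk(ps, i):
--         # returns (param_block, arcpy_args, docs) for parameters ps starting
--         # at position i, each already joined with its separator
--         if not ps:
--             return "", "", ""
--         p, rest = ps[0], ps[1:]
--         pn = norm(p["name"])
--         dt = p["datatype"]
--
--         block = f'    {pn} = params.get("{pn}")'
--         if i < 2:
--             block += f'\n    if {pn} is None:'
--             block += f'\n        return {{"success": False, "error": "{pn} parameter is required"}}'
--
--         b2, a2, d2 = walk(rest, i + 1)
--
--         if rest:
--             block += "\n" + b2
--         arg = f'r"{{{pn}}}"' + (", " + a2 if rest else "")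
--         if i < 3:
--             docs = f'"{pn}": <{dt}>'
--             if rest and i + 1 < 3:
--                 docs += ", " + d2
--         else:
--             docs = ""
--         return block, arg, docs
--
--     param_block, arcpy_args, docs = walk(parameters, 0)
--
--     if parameters:
--         output_name = f"{norm(parameters[0]['name']).replace(' ', '_')}_{tool_name}"
--     else:
--         output_name = f"{tool_name}_output"
--
--     return TEMPLATE.format(
--         func_name=norm(tool_name),
--         tool_name=tool_name,
--         desc=summary if summary else f'Execute {tool_name} geoprocessing tool.',
--         docs=docs + (', ...' if len(parameters) > 3 else ''),
--         param_block=param_block,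
--         output_name=output_name,
--         arcpy_args=arcpy_args,
--     )
-- ===== Notes on version B (the rewrite author's own statement) =====
-- stated objective: alternative
-- what changed: B is a recursive descent: one structurally recursive walk over the parameter list returns three ready-joined strings (param block, arcpy args, docstring pairs) built back-to-front with separators decided per step, and the result is produced by substituting six computed fields into a module-level named-placeholder template via str.format, instead of A's three staged list-accumulator scans interpolated into an f-string.
import Mathlib
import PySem

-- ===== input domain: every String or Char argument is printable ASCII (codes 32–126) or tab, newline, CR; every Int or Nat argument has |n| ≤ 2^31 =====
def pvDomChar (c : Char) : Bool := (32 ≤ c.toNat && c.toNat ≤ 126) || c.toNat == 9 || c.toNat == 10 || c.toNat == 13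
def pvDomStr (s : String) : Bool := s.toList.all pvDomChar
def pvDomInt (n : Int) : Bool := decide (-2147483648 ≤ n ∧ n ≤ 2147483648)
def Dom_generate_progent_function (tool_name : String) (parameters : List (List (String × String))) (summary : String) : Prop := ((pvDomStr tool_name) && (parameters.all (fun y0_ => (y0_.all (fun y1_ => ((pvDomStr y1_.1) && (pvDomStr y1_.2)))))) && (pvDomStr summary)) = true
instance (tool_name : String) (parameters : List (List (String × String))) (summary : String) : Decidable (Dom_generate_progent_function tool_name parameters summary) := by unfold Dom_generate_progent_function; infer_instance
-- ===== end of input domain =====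

-- B replaces A's three staged list-accumulator scans + f-string interpolation by a single structural
-- recursion over the parameter list returning three ready-joined strings, spliced into a fixed template.

-- shared helpers (identical code in both Pythons): name normalization and dict-key access
def pvNorm (s : String) : String :=
  PySem.Str.replace (PySem.Str.replace (PySem.Str.lower s) " " "_") "-" "_"

-- param["k"]: first-match lookup; Pre_ guarantees the key is present (KeyError excluded)
def pvGet (param : List (String × String)) (key : String) : String :=
  ((PySem.Dict.mk param).get? key).getD ""

-- ===== PORT A =====
-- body of A's first loop: state = (param_lines, required_params), input = (i, param)
def pvAStep (st : List String × List String) (ip : Int × List (String × String)) :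
    List String × List String :=
  let param := ip.2
  let name := pvGet param "name"
  let _datatype := pvGet param "datatype"
  let _explanation := pvGet param "explanation"
  let param_name := pvNorm name
  if ip.1 < 2 then
    (st.1 ++ ["    " ++ param_name ++ " = params.get(\"" ++ param_name ++ "\")",
              "    if " ++ param_name ++ " is None:",
              "        return {\"success\": False, \"error\": \"" ++ param_name ++ " parameter is required\"}"],
     st.2 ++ [param_name])
  else
    (st.1 ++ ["    " ++ param_name ++ " = params.get(\"" ++ param_name ++ "\")"], st.2)

def pvArcpyEntry (param : List (String × String)) : String :=
  "r\"{" ++ pvNorm (pvGet param "name") ++ "}\""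

def pvDocEntry (param : List (String × String)) : String :=
  "\"" ++ pvNorm (pvGet param "name") ++ "\": <" ++ pvGet param "datatype" ++ ">"

def generate_progent_function (tool_name : String) (parameters : List (List (String × String))) (summary : String) : String :=
  let func_name := pvNorm tool_name
  let st := (PySem.List.enumerate parameters).foldl pvAStep ([], [])
  let param_lines := st.1
  let required_params := st.2
  let output_name :=
    match required_params with
    | r0 :: _ => PySem.Str.replace r0 " " "_" ++ "_" ++ tool_name
    | [] => tool_name ++ "_output"
  let arcpy_args := parameters.foldl (fun acc param => acc ++ [pvArcpyEntry param]) ([] : List String)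
  -- summary if summary else …  (empty string is falsy)
  let desc := if summary == "" then "Execute " ++ tool_name ++ " geoprocessing tool." else summary
  -- parameters[:3] with a non-negative literal bound is List.take 3
  let docs := PySem.Str.join ", " ((parameters.take 3).map pvDocEntry)
  let dots := if parameters.length > 3 then ", ..." else ""
  -- the triple-quoted f-string template, chunked at its newlines
  "    def " ++ func_name ++ "(self, params):" ++ "\n" ++
  "        \"\"\"" ++ tool_name ++ "\n" ++ "\n" ++
  desc ++ "\n" ++ "\n" ++
  "        params: {" ++ docs ++ dots ++ "}" ++ "\n" ++
  "        Returns: {\"success\": True, \"output_layer\": <output_name>, \"output_path\": <output_path>} or error" ++ "\n" ++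
  "        \"\"\"" ++ "\n" ++
  "        try:" ++ "\n" ++
  PySem.Str.join "\n" param_lines ++ "\n" ++ "\n" ++
  "            # Generate output path" ++ "\n" ++
  "            aprx = arcpy.mp.ArcGISProject(\"CURRENT\")" ++ "\n" ++
  "            output_path = os.path.join(aprx.defaultGeodatabase, \"" ++ output_name ++ "\")" ++ "\n" ++
  "            output_path = arcpy.CreateUniqueName(output_path)" ++ "\n" ++ "\n" ++
  "            # Execute " ++ tool_name ++ "\n" ++
  "            arcpy." ++ tool_name ++ "(" ++ PySem.Str.join ", " arcpy_args ++ ")" ++ "\n" ++ "\n" ++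
  "            self._add_to_map(output_path)" ++ "\n" ++
  "            return {\"success\": True, \"output_layer\": \"" ++ output_name ++ "\", \"output_path\": output_path}" ++ "\n" ++ "\n" ++
  "        except Exception as e:" ++ "\n" ++
  "            return {\"success\": False, \"error\": str(e)}" ++ "\n"

-- ===== PORT B =====
-- B's recursive walk: (param_block, arcpy_args, docs) for the parameters from position i on,
-- each already joined with its separator, built back-to-front
def pvWalk : Int → List (List (String × String)) → String × String × String
  | _, [] => ("", "", "")
  | i, p :: rest =>
    let pn := pvNorm (pvGet p "name")
    let dt := pvGet p "datatype"
    let block0 := "    " ++ pn ++ " = params.get(\"" ++ pn ++ "\")"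
    let block1 :=
      if i < 2 then
        block0 ++ "\n    if " ++ pn ++ " is None:" ++
          "\n        return {\"success\": False, \"error\": \"" ++ pn ++ " parameter is required\"}"
      else block0
    let r := pvWalk (i + 1) rest
    let block := if rest.isEmpty then block1 else block1 ++ "\n" ++ r.1
    let arg := "r\"{" ++ pn ++ "}\"" ++ (if rest.isEmpty then "" else ", " ++ r.2.1)
    let docs :=
      if i < 3 then
        (if ¬ rest.isEmpty ∧ i + 1 < 3 then
           "\"" ++ pn ++ "\": <" ++ dt ++ ">" ++ ", " ++ r.2.2
         else "\"" ++ pn ++ "\": <" ++ dt ++ ">")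
      else ""
    (block, arg, docs)

def generate_progent_function_alt (tool_name : String) (parameters : List (List (String × String))) (summary : String) : String :=
  let w := pvWalk 0 parameters
  let output_name :=
    match parameters with
    | p :: _ => PySem.Str.replace (pvNorm (pvGet p "name")) " " "_" ++ "_" ++ tool_name
    | [] => tool_name ++ "_output"
  let func_name := pvNorm tool_name
  let desc := if summary == "" then "Execute " ++ tool_name ++ " geoprocessing tool." else summary
  let docs := w.2.2 ++ (if parameters.length > 3 then ", ..." else "")
  -- TEMPLATE.format(...): the literal template with the named fields spliced in
  "    def " ++ func_name ++ "(self, params):" ++ "\n" ++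
  "        \"\"\"" ++ tool_name ++ "\n" ++ "\n" ++
  desc ++ "\n" ++ "\n" ++
  "        params: {" ++ docs ++ "}" ++ "\n" ++
  "        Returns: {\"success\": True, \"output_layer\": <output_name>, \"output_path\": <output_path>} or error" ++ "\n" ++
  "        \"\"\"" ++ "\n" ++
  "        try:" ++ "\n" ++
  w.1 ++ "\n" ++ "\n" ++
  "            # Generate output path" ++ "\n" ++
  "            aprx = arcpy.mp.ArcGISProject(\"CURRENT\")" ++ "\n" ++
  "            output_path = os.path.join(aprx.defaultGeodatabase, \"" ++ output_name ++ "\")" ++ "\n" ++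
  "            output_path = arcpy.CreateUniqueName(output_path)" ++ "\n" ++ "\n" ++
  "            # Execute " ++ tool_name ++ "\n" ++
  "            arcpy." ++ tool_name ++ "(" ++ w.2.1 ++ ")" ++ "\n" ++ "\n" ++
  "            self._add_to_map(output_path)" ++ "\n" ++
  "            return {\"success\": True, \"output_layer\": \"" ++ output_name ++ "\", \"output_path\": output_path}" ++ "\n" ++ "\n" ++
  "        except Exception as e:" ++ "\n" ++
  "            return {\"success\": False, \"error\": str(e)}" ++ "\n"

-- ===== PRECONDITION & SPEC =====
-- Pre_ excludes exactly the inputs where A raises KeyError: some parameter dict lacks one of the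
-- three keys "name"/"datatype"/"explanation".
def Pre_generate_progent_function (tool_name : String) (parameters : List (List (String × String))) (summary : String) : Prop :=
  parameters.all (fun p =>
    (PySem.Dict.mk p).contains "name" &&
    (PySem.Dict.mk p).contains "datatype" &&
    (PySem.Dict.mk p).contains "explanation") = true

instance (tool_name : String) (parameters : List (List (String × String))) (summary : String) : Decidable (Pre_generate_progent_function tool_name parameters summary) := by unfold Pre_generate_progent_function; infer_instance

def pvWitness_generate_progent_function : String × (List (List (String × String))) × String :=
  ("Buffer",
   [[("name", "Input Features"), ("datatype", "GPFeatureLayer"), ("explanation", "the input")],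
    [("name", "Distance"), ("datatype", "GPLinearUnit"), ("explanation", "buffer distance")]],
   "Buffers features.")

def Spec_generate_progent_function (tool_name : String) (parameters : List (List (String × String))) (summary : String) (out : String) : Prop := out = generate_progent_function_alt tool_name parameters summary
instance (tool_name : String) (parameters : List (List (String × String))) (summary : String) (out : String) : Decidable (Spec_generate_progent_function tool_name parameters summary out) := by unfold Spec_generate_progent_function; infer_instance

-- ===== CLAIM =====
def Claim_equal_generate_progent_function : Prop := ∀ (tool_name : String) (parameters : List (List (String × String))) (summary : String), Dom_generate_progent_function tool_name parameters summary → Pre_generate_progent_function tool_name parameters summary → Spec_generate_progent_function tool_name parameters summary (generate_progent_function tool_name parameters summary)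

-- ===== LEMMAS AND PROOFS =====

-- recursive description of A's first loop: the emitted lines and the required names, from index i on
def pvALines : Int → List (List (String × String)) → List String
  | _, [] => []
  | i, p :: ps =>
    let pn := pvNorm (pvGet p "name")
    if i < 2 then
      ("    " ++ pn ++ " = params.get(\"" ++ pn ++ "\")") ::
      ("    if " ++ pn ++ " is None:") ::
      ("        return {\"success\": False, \"error\": \"" ++ pn ++ " parameter is required\"}") ::
      pvALines (i + 1) ps
    else
      ("    " ++ pn ++ " = params.get(\"" ++ pn ++ "\")") :: pvALines (i + 1) ps

def pvAReq : Int → List (List (String × String)) → List String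
  | _, [] => []
  | i, p :: ps => (if i < 2 then [pvNorm (pvGet p "name")] else []) ++ pvAReq (i + 1) ps

-- the docstring entries A's comprehension takes (collected while the index is < 3)
def pvDocOf (i : Int) : List (List (String × String)) → List String
  | [] => []
  | p :: ps => (if i < 3 then [pvDocEntry p] else []) ++ pvDocOf (i + 1) ps

theorem pvAFold (ps : List (List (String × String))) :
    ∀ (i : Int) (pl rp : List String),
      (PySem.List.enumerate ps i).foldl pvAStep (pl, rp)
        = (pl ++ pvALines i ps, rp ++ pvAReq i ps) := by
  induction ps with
  | nil => intro i pl rp; simp [PySem.List.enumerate_nil, pvALines, pvAReq]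
  | cons p ps ih =>
      intro i pl rp
      rw [PySem.List.enumerate_cons]
      simp only [List.foldl_cons]
      rw [ih]
      simp only [pvAStep, pvALines, pvAReq]
      by_cases h2 : i < 2 <;> simp [h2, List.append_assoc]

theorem pvDocOf_ge : ∀ (ps : List (List (String × String))) (i : Int), 3 ≤ i → pvDocOf i ps = [] := by
  intro ps
  induction ps with
  | nil => intro i _; simp [pvDocOf]
  | cons p ps ih =>
      intro i hi
      have : ¬ i < 3 := by omega
      simp [pvDocOf, this, ih (i + 1) (by omega)]

theorem pvDocOf_take : ∀ (ps : List (List (String × String))) (k : Nat), k ≤ 3 →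
    pvDocOf (3 - (k : Int)) ps = (ps.take k).map pvDocEntry := by
  intro ps
  induction ps with
  | nil => intro k _; simp [pvDocOf]
  | cons p ps ih =>
      intro k hk
      cases k with
      | zero => simp [pvDocOf_ge (p :: ps) 3 (by omega)]
      | succ k' =>
          have h3 : (3 : Int) - ((k' + 1 : Nat) : Int) < 3 := by push_cast; omega
          have hstep : (3 : Int) - ((k' + 1 : Nat) : Int) + 1 = 3 - (k' : Int) := by push_cast; omega
          simp only [pvDocOf, h3, if_pos, List.take_succ_cons, List.map_cons, hstep]
          rw [ih k' (by omega)]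
          simp

theorem pvStrJoin_cons_cons (sep a b : String) (rest : List String) :
    PySem.Str.join sep (a :: b :: rest) = a ++ sep ++ PySem.Str.join sep (b :: rest) := by
  apply String.toList_inj.mp
  simp [pysem, PySem.Chars.join_cons_cons]

theorem pvStrJoin_singleton (sep a : String) : PySem.Str.join sep [a] = a := by
  apply String.toList_inj.mp
  simp [pysem, PySem.Chars.join_singleton]

theorem pvStrJoin_nil (sep : String) : PySem.Str.join sep [] = "" := by
  apply String.toList_inj.mp
  simp [pysem, PySem.Chars.join_nil]

theorem pvStrJoin_cons (sep a : String) (l : List String) :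
    PySem.Str.join sep (a :: l) = a ++ (if l.isEmpty then "" else sep ++ PySem.Str.join sep l) := by
  cases l with
  | nil => simp [pvStrJoin_singleton]
  | cons b bs => simp [pvStrJoin_cons_cons, String.append_assoc]

theorem pvALines_isEmpty (i : Int) (ps : List (List (String × String))) :
    (pvALines i ps).isEmpty = ps.isEmpty := by
  cases ps with
  | nil => simp [pvALines]
  | cons p ps' => by_cases h2 : i < 2 <;> simp [pvALines, h2]

-- B's recursive walk computes the three joined strings of A's staged scans
theorem pvWalk_eq (ps : List (List (String × String))) :
    ∀ i : Int, pvWalk i ps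
      = (PySem.Str.join "\n" (pvALines i ps),
         PySem.Str.join ", " (ps.map pvArcpyEntry),
         PySem.Str.join ", " (pvDocOf i ps)) := by
  induction ps with
  | nil => intro i; simp [pvWalk, pvALines, pvDocOf, pvStrJoin_nil]
  | cons p ps ih =>
      intro i
      simp only [pvWalk, ih, Prod.mk.injEq]
      refine ⟨?_, ?_, ?_⟩
      · -- param block
        by_cases h2 : i < 2 <;> by_cases hps : ps.isEmpty <;>
          simp only [pvALines, h2, hps, if_true, if_false, pvStrJoin_cons, pvALines_isEmpty,
            List.isEmpty_cons, Bool.false_eq_true] <;>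
          (apply String.toList_inj.mp; simp [String.toList_append])
      · -- arcpy args
        simp only [List.map_cons, pvStrJoin_cons, List.isEmpty_map]
        by_cases hps : ps.isEmpty <;> simp [hps, pvArcpyEntry, String.append_assoc]
      · -- docstring entries
        by_cases h3 : i < 3
        · by_cases hc : ¬ ps.isEmpty ∧ i + 1 < 3
          · obtain ⟨hne, h13⟩ := hc
            cases ps with
            | nil => simp at hne
            | cons q qs =>
                have hdoc : pvDocOf (i + 1) (q :: qs) = pvDocEntry q :: pvDocOf (i + 1 + 1) qs := by
                  simp [pvDocOf, h13]
                simp [pvDocOf, pvDocEntry, h3, h13, pvStrJoin_cons, String.append_assoc]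
                apply String.toList_inj.mp; simp [String.toList_append]
          · have hdoc : pvDocOf (i + 1) ps = [] := by
              by_cases hps : ps.isEmpty
              · cases ps with
                | nil => simp [pvDocOf]
                | cons q qs => simp at hps
              · have h13 : ¬ i + 1 < 3 := by tauto
                exact pvDocOf_ge _ _ (by omega)
            rw [if_pos h3, if_neg hc]
            simp [pvDocOf, pvDocEntry, h3, hdoc, pvStrJoin_cons]
        · have hdoc : pvDocOf (i + 1) ps = [] := pvDocOf_ge _ _ (by omega)
          rw [if_neg h3]
          simp [pvDocOf, h3, hdoc, pvStrJoin_nil]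

-- ===== VERDICT =====
theorem generate_progent_function_spec : Claim_equal_generate_progent_function := by
  intro tool_name parameters summary _hDom _hPre
  unfold Spec_generate_progent_function
  unfold generate_progent_function generate_progent_function_alt
  rw [pvAFold, pvWalk_eq]
  have harc : parameters.foldl (fun acc param => acc ++ [pvArcpyEntry param]) ([] : List String)
      = parameters.map pvArcpyEntry := by
    simpa using PySem.List.foldl_append_singleton_eq_map pvArcpyEntry parameters []
  have hdoc : pvDocOf 0 parameters = (parameters.take 3).map pvDocEntry := by
    have := pvDocOf_take parameters 3 (by omega)
    simpa using this
  cases parameters with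
  | nil => simp [pvAReq, pvALines, pvDocOf, pvStrJoin_nil, String.append_assoc]
  | cons p ps =>
      simp only [harc, ← hdoc, List.nil_append, pvAReq, show (0 : Int) < 2 by omega, if_pos,
        List.cons_append, List.nil_append]
      simp [String.append_assoc]
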